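-- pv_equiv track=rewrite | github.com/mkierc/advent-of-code | 2024/src/day_22/part_1.py | calculate_secret
-- ===== SOURCE A (Python) =====
-- def calculate_secret(secret, iterations):
--     for i in range(iterations):
--         result = secret * 64
--         secret = result ^ secret
--         secret = secret % 16777216
--         result = secret // 32
--         secret = result ^ secret
--         secret = secret % 16777216
--         result = secret * 2048
--         secret = result ^ secret
--         secret = secret % 16777216
--
--     return secret
-- ===== SOURCE B (Python) =====
-- # GF(2) linear-algebra reimplementation: one PRNG round is a linear map on 24-bit
-- # vectors; apply its matrix power via binary exponentiation instead of iterating.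
-- _MASK = (1 << 24) - 1
--
--
-- def _step_cols():
--     # columns of the one-round matrix: image of each basis vector 2^i
--     cols = []
--     for i in range(24):
--         x = 1 << i
--         x = (x ^ (x << 6)) & _MASK
--         x = (x ^ (x >> 5)) & _MASK
--         x = (x ^ (x << 11)) & _MASK
--         cols.append(x)
--     return cols
--
--
-- def _apply(cols, x):
--     y = 0
--     for i, c in enumerate(cols):
--         if (x >> i) & 1:
--             y ^= c
--     return y
--
--
-- def _compose(f, g):
--     return [_apply(f, c) for c in g]
--
--
-- def calculate_secret(secret, iterations):
--     if iterations <= 0: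
--         return secret
--     base = _step_cols()
--     acc = [1 << i for i in range(24)]
--     n = iterations
--     while n > 0:
--         if n & 1:
--             acc = _compose(base, acc)
--         base = _compose(base, base)
--         n >>= 1
--     return _apply(acc, secret & _MASK)
-- ===== Notes on version B (the rewrite author's own statement) =====
-- stated objective: faster
-- what changed: One PRNG round is a GF(2)-linear map on 24-bit vectors, so B builds its 24x24 bit matrix (columns as bitmasks) and applies its iterations-th power via binary exponentiation instead of running the round iterations times.
import Mathlib
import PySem

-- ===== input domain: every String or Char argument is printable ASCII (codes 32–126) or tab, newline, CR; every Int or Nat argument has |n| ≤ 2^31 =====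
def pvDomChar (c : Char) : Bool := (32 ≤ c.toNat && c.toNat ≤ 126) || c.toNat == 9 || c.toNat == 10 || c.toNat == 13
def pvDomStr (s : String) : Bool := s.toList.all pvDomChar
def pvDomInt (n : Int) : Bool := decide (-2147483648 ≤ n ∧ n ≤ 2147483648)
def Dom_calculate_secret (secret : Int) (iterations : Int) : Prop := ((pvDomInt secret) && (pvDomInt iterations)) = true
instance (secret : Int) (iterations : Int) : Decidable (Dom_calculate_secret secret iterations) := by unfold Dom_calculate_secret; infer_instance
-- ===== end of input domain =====

-- B replaces the per-iteration PRNG loop by the 24×24 GF(2) matrix of one round,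
-- raised to the iterations-th power by binary exponentiation (objective: faster).

-- ===== PORT A =====
def calculate_secret (secret : Int) (iterations : Int) : Int :=
  (PySem.List.pyRange 0 iterations 1).foldl (fun s _ =>
    let result := s * 64
    let s := PySem.Int.bxor result s
    let s := PySem.Int.mod s 16777216
    let result := PySem.Int.floordiv s 32
    let s := PySem.Int.bxor result s
    let s := PySem.Int.mod s 16777216
    let result := s * 2048
    let s := PySem.Int.bxor result s
    PySem.Int.mod s 16777216) secret

-- ===== PORT B =====
-- _step_cols: columns of the one-round matrix (image of each basis vector 1 <<< i)
def pvStepCols : List Nat :=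
  (List.range 24).map (fun i =>
    let x := 1 <<< i
    let x := (x ^^^ (x <<< 6)) &&& 16777215
    let x := (x ^^^ (x >>> 5)) &&& 16777215
    (x ^^^ (x <<< 11)) &&& 16777215)

-- _apply: xor together the columns at the set bit positions of x
def pvApply (cols : List Nat) (x : Nat) : Nat :=
  (cols.zipIdx).foldl (fun y ci => if (x >>> ci.2) &&& 1 = 1 then y ^^^ ci.1 else y) 0

-- _compose
def pvCompose (f g : List Nat) : List Nat := g.map (pvApply f)

-- the while-loop of B: square-and-multiply on the matrix
def pvPow (base acc : List Nat) (n : Nat) : List Nat :=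
  if n = 0 then acc
  else pvPow (pvCompose base base) (if n % 2 = 1 then pvCompose base acc else acc) (n / 2)
  termination_by n
  decreasing_by omega

def calculate_secret_alt (secret : Int) (iterations : Int) : Int :=
  if iterations ≤ 0 then secret
  else
    ((pvApply (pvPow pvStepCols ((List.range 24).map (fun i => 1 <<< i)) iterations.toNat)
      ((PySem.Int.mod secret 16777216).toNat) : Nat) : Int)

-- ===== PRECONDITION & SPEC =====
def Spec_calculate_secret (secret : Int) (iterations : Int) (out : Int) : Prop := out = calculate_secret_alt secret iterations
instance (secret : Int) (iterations : Int) (out : Int) : Decidable (Spec_calculate_secret secret iterations out) := by unfold Spec_calculate_secret; infer_instance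

-- ===== CLAIM (what is proved, stated in full; the proofs are below) =====
def Claim_equal_calculate_secret : Prop := ∀ (secret : Int) (iterations : Int), Dom_calculate_secret secret iterations → Spec_calculate_secret secret iterations (calculate_secret secret iterations)

-- ===== LEMMAS AND PROOFS =====

-- the one Python round, on a 24-bit Nat
def pvStepN (x : Nat) : Nat :=
  let a := ((x <<< 6) ^^^ x) % 16777216
  let b := ((a >>> 5) ^^^ a) % 16777216
  ((b <<< 11) ^^^ b) % 16777216

-- A's loop body, named
def pvRoundA (s : Int) : Int :=
  PySem.Int.mod
    (PySem.Int.bxor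
      ((PySem.Int.mod
        (PySem.Int.bxor
          (PySem.Int.floordiv (PySem.Int.mod (PySem.Int.bxor (s * 64) s) 16777216) 32)
          (PySem.Int.mod (PySem.Int.bxor (s * 64) s) 16777216)) 16777216) * 2048)
      (PySem.Int.mod
        (PySem.Int.bxor
          (PySem.Int.floordiv (PySem.Int.mod (PySem.Int.bxor (s * 64) s) 16777216) 32)
          (PySem.Int.mod (PySem.Int.bxor (s * 64) s) 16777216)) 16777216)) 16777216

theorem pvBxor_eq_xor (a b : Int) : PySem.Int.bxor a b = Int.xor a b := by
  cases a with
  | ofNat m => cases b with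
    | ofNat n => simp [PySem.Int.bxor, Int.xor]
    | negSucc n => simp [PySem.Int.bxor, Int.xor, Int.negSucc_eq]; omega
  | negSucc m => cases b with
    | ofNat n => simp [PySem.Int.bxor, Int.xor, Int.negSucc_eq]; omega
    | negSucc n => simp [PySem.Int.bxor, Int.xor, Int.negSucc_eq]; omega
theorem pvBit_emod (b : Bool) (m : Int) (k : Nat) :
    (Int.bit b m) % ((2:Int)^(k+1)) = Int.bit b (m % (2:Int)^k) := by
  have h1 : (0:Int) ≤ m % 2^k := Int.emod_nonneg m (by positivity)
  have h2 : m % 2^k < 2^k := Int.emod_lt_of_pos m (by positivity)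
  have hm := Int.mul_ediv_add_emod m (2^k)
  have key : ∀ c : Int, 0 ≤ c → c < 2 → (2 * m + c) % ((2:Int)^(k+1)) = 2 * (m % 2^k) + c := by
    intro c hc0 hc2
    have : 2 * m + c = (2 * (m % 2^k) + c) + (2^(k+1)) * (m / 2^k) := by
      have h3 : (2:Int)^k * (m / 2^k) = m / 2^k * 2^k := mul_comm _ _
      rw [pow_succ]; ring_nf; omega
    rw [this, Int.add_mul_emod_self_left, Int.emod_eq_of_lt (by omega) (by rw [pow_succ]; omega)]
  cases b <;> simp only [Int.bit, cond]
  · simpa using key 0 (by norm_num) (by norm_num)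
  · exact key 1 (by norm_num) (by norm_num)
theorem pvXor_emod (k : Nat) (a b : Int) :
    (Int.xor a b) % ((2:Int)^k) = (Int.xor (a % (2:Int)^k) (b % (2:Int)^k)) % (2:Int)^k := by
  induction k generalizing a b with
  | zero => simp
  | succ k ih =>
    conv_lhs => rw [← Int.bit_decomp a, ← Int.bit_decomp b]
    rw [Int.lxor_bit, pvBit_emod, ih,
      show a % (2:Int)^(k+1) = (Int.bit a.bodd (a.div2)) % (2:Int)^(k+1) by rw [Int.bit_decomp],
      show b % (2:Int)^(k+1) = (Int.bit b.bodd (b.div2)) % (2:Int)^(k+1) by rw [Int.bit_decomp],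
      pvBit_emod, pvBit_emod, Int.lxor_bit, pvBit_emod]

theorem pvModM (x : Int) : PySem.Int.mod x 16777216 = x % 16777216 :=
  PySem.Int.mod_eq_emod_of_pos (by norm_num)

theorem pvMXor (a b k : Nat) : ((a % 2^k) ^^^ b) % 2^k = (a ^^^ b) % 2^k := by
  rw [Nat.xor_mod_two_pow, Nat.mod_mod_of_dvd a dvd_rfl, ← Nat.xor_mod_two_pow]

theorem pvCastMod (m n : Nat) :
    PySem.Int.mod (PySem.Int.bxor ((m:Int)) ((n:Int))) 16777216 = (((m ^^^ n) % 16777216 : Nat) : Int) := by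
  rw [PySem.Int.bxor_natCast, pvModM]
  norm_cast

theorem pvCastDiv (n : Nat) : PySem.Int.floordiv ((n:Int)) 32 = ((n >>> 5 : Nat) : Int) := by
  rw [Nat.shiftRight_eq_div_pow, show ((32:Int)) = ((32:Nat):Int) from rfl, PySem.Int.floordiv_natCast]

theorem pvRoundA_eq (x : Int) :
    pvRoundA x = ((pvStepN ((x % 16777216).toNat) : Nat) : Int) := by
  have hM : (16777216:Int) = 2^24 := by norm_num
  have hr0 : (0:Int) <= x % 16777216 := Int.emod_nonneg x (by norm_num)
  set r : Nat := (x % 16777216).toNat with hr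
  have hxr : x % 16777216 = (r:Int) := (Int.toNat_of_nonneg hr0).symm
  have hmul : (x*64) % (16777216:Int) = ((r:Int) * 64) % 16777216 := by
    rw [Int.mul_emod, hxr]; norm_num
  have h1 : PySem.Int.mod (PySem.Int.bxor (x*64) x) 16777216
      = ((((r <<< 6) ^^^ r) % 16777216 : Nat) : Int) := by
    rw [pvModM, pvBxor_eq_xor, hM, pvXor_emod, ← hM, hmul, hxr,
      show ((r:Int) * 64) = (((r * 64 : Nat)):Int) by push_cast; ring,
      show (((r*64 : Nat)):Int) % 16777216 = (((r*64 % 16777216 : Nat)):Int) by norm_cast,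
      ← pvBxor_eq_xor, PySem.Int.bxor_natCast,
      show ((((r*64 % 16777216) ^^^ r : Nat)):Int) % 16777216 = ((((r*64 % 16777216) ^^^ r) % 16777216 : Nat) : Int) by norm_cast]
    congr 1
    rw [Nat.shiftLeft_eq, show (2^6:Nat) = 64 from by norm_num,
      show (16777216:Nat) = 2^24 from by norm_num, pvMXor]

  set n1 : Nat := ((r <<< 6) ^^^ r) % 16777216 with hn1
  have h2 : PySem.Int.mod
      (PySem.Int.bxor (PySem.Int.floordiv ((n1:Int)) 32) ((n1:Int))) 16777216
      = (((n1 >>> 5 ^^^ n1) % 16777216 : Nat) : Int) := by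
    rw [pvCastDiv, pvCastMod]
  set n2 : Nat := (n1 >>> 5 ^^^ n1) % 16777216 with hn2
  have h3 : PySem.Int.mod (PySem.Int.bxor (((n2:Int)) * 2048) ((n2:Int))) 16777216
      = ((((n2 <<< 11) ^^^ n2) % 16777216 : Nat) : Int) := by
    have hcast : ((n2:Int)) * (2048:Int) = ((n2 <<< 11 : Nat) : Int) := by
      push_cast [Nat.shiftLeft_eq]; ring
    rw [hcast, pvCastMod]
  rw [pvRoundA, h1, h2, h3]
  simp only [pvStepN]
  rw [← hn1, ← hn2]

theorem pvBitIff (x i : Nat) : ((x >>> i) &&& 1 = 1) ↔ x.testBit i = true := by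
  simp [Nat.and_one_is_mod, Nat.shiftRight_eq_div_pow, Nat.testBit_eq_decide_div_mod_eq]

-- accumulator extraction for the _apply fold
theorem pvApply_acc (x y : Nat) (l : List (Nat × Nat)) :
    l.foldl (fun y ci => if (x >>> ci.2) &&& 1 = 1 then y ^^^ ci.1 else y) y
      = y ^^^ l.foldl (fun y ci => if (x >>> ci.2) &&& 1 = 1 then y ^^^ ci.1 else y) 0 := by
  induction l generalizing y with
  | nil => simp
  | cons c t ih =>
    simp only [List.foldl_cons]
    rw [ih, ih (if (x >>> c.2) &&& 1 = 1 then 0 ^^^ c.1 else 0)]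
    split <;> simp [Nat.xor_assoc]

theorem pvS_zero (l : List (Nat × Nat)) :
    l.foldl (fun y ci => if ((0:Nat) >>> ci.2) &&& 1 = 1 then y ^^^ ci.1 else y) 0 = 0 := by
  induction l with
  | nil => simp
  | cons c t ih => simp [Nat.zero_shiftRight]

theorem pvApply_zero (cols : List Nat) : pvApply cols 0 = 0 := pvS_zero _

theorem pvS_xor (a b : Nat) (l : List (Nat × Nat)) :
    l.foldl (fun y ci => if ((a ^^^ b) >>> ci.2) &&& 1 = 1 then y ^^^ ci.1 else y) 0
      = l.foldl (fun y ci => if (a >>> ci.2) &&& 1 = 1 then y ^^^ ci.1 else y) 0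
        ^^^ l.foldl (fun y ci => if (b >>> ci.2) &&& 1 = 1 then y ^^^ ci.1 else y) 0 := by
  induction l with
  | nil => simp
  | cons c t ih =>
    simp only [List.foldl_cons]
    rw [pvApply_acc (a ^^^ b), pvApply_acc a, pvApply_acc b, ih]
    have hbit : (((a ^^^ b) >>> c.2) &&& 1 = 1) ↔ ¬ (((a >>> c.2) &&& 1 = 1) ↔ ((b >>> c.2) &&& 1 = 1)) := by
      simp only [pvBitIff, Nat.testBit_xor]
      cases ha : a.testBit c.2 <;> cases hb : b.testBit c.2 <;> simp
    have hcancel : ∀ u v w : Nat, (u ^^^ v) ^^^ (u ^^^ w) = v ^^^ w := by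
      intro u v w
      have h1 : (u ^^^ v) ^^^ (u ^^^ w) = (u ^^^ u) ^^^ (v ^^^ w) := by ac_rfl
      simp [h1]
    by_cases ha : (a >>> c.2) &&& 1 = 1 <;> by_cases hb : (b >>> c.2) &&& 1 = 1
    · have h : ¬ ((a ^^^ b) >>> c.2 &&& 1 = 1) := by rw [hbit]; tauto
      rw [if_neg h, if_pos ha, if_pos hb]
      simp only [Nat.zero_xor]
      rw [hcancel]
    · have h : ((a ^^^ b) >>> c.2 &&& 1 = 1) := by rw [hbit]; tauto
      rw [if_pos h, if_pos ha, if_neg hb]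
      simp only [Nat.zero_xor]
      ac_rfl
    · have h : ((a ^^^ b) >>> c.2 &&& 1 = 1) := by rw [hbit]; tauto
      rw [if_pos h, if_neg ha, if_pos hb]
      simp only [Nat.zero_xor]
      ac_rfl
    · have h : ¬ ((a ^^^ b) >>> c.2 &&& 1 = 1) := by rw [hbit]; tauto
      rw [if_neg h, if_neg ha, if_neg hb]
      simp only [Nat.zero_xor]

theorem pvApply_xor (cols : List Nat) (a b : Nat) :
    pvApply cols (a ^^^ b) = pvApply cols a ^^^ pvApply cols b := pvS_xor a b _

theorem pvZipIdx_map (h : Nat → Nat) (g : List Nat) (k : Nat) :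
    (g.map h).zipIdx k = (g.zipIdx k).map (fun ci => (h ci.1, ci.2)) := by
  induction g generalizing k with
  | nil => simp
  | cons c t ih => simp [List.zipIdx_cons, ih]

theorem pvS_map (f : List Nat) (x : Nat) (l : List (Nat × Nat)) :
    (l.map (fun ci => (pvApply f ci.1, ci.2))).foldl
        (fun y ci => if (x >>> ci.2) &&& 1 = 1 then y ^^^ ci.1 else y) 0
      = pvApply f (l.foldl (fun y ci => if (x >>> ci.2) &&& 1 = 1 then y ^^^ ci.1 else y) 0) := by
  induction l with
  | nil => simp [pvApply_zero]
  | cons c t ih =>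
    simp only [List.map_cons, List.foldl_cons]
    rw [pvApply_acc x, pvApply_acc x (if (x >>> c.2) &&& 1 = 1 then 0 ^^^ c.1 else 0), ih,
      pvApply_xor]
    congr 1
    split <;> simp [pvApply_zero]

theorem pvApply_compose (f g : List Nat) (x : Nat) :
    pvApply (pvCompose f g) x = pvApply f (pvApply g x) := by
  unfold pvApply pvCompose
  rw [pvZipIdx_map, pvS_map]
  rfl

theorem pvLin_ext (f g : Nat → Nat)
    (hf : ∀ a b, f (a ^^^ b) = f a ^^^ f b) (hg : ∀ a b, g (a ^^^ b) = g a ^^^ g b)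
    (h0 : f 0 = g 0) (hb : ∀ i, i < 24 → f (2^i) = g (2^i)) :
    ∀ x, x < 2^24 → f x = g x := by
  intro x
  induction x using Nat.strong_induction_on with
  | _ x ih =>
    intro hx
    rcases Nat.eq_zero_or_pos x with h0x | h0x
    · subst h0x; exact h0
    have hlog1 : 2 ^ x.log2 ≤ x := Nat.log2_self_le (by omega)
    have hlog2 : x < 2 ^ (x.log2 + 1) := Nat.lt_log2_self
    set i := x.log2 with hi
    have hi24 : i < 24 := by
      by_contra hcon
      have : (2:Nat)^24 ≤ 2^i := Nat.pow_le_pow_right (by norm_num) (by omega)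
      omega
    have htop : x.testBit i = true := Nat.testBit_log2 (by omega)
    set y := x ^^^ 2^i with hy
    have hyx : y < 2^i := by
      apply Nat.lt_pow_two_of_testBit
      intro j hj
      rcases Nat.eq_or_lt_of_le hj with rfl | hlt
      · simp [hy, Nat.testBit_xor, htop, Nat.testBit_two_pow_self]
      · have h1 : x.testBit j = false := Nat.testBit_lt_two_pow (by
          calc x < 2^(i+1) := hlog2
          _ ≤ 2^j := Nat.pow_le_pow_right (by norm_num) (by omega))
        simp [hy, Nat.testBit_xor, h1, Nat.testBit_two_pow_of_ne (by omega : i ≠ j)]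
    have hxy : x = y ^^^ 2^i := by
      rw [hy, Nat.xor_assoc, Nat.xor_self, Nat.xor_zero]
    rw [hxy, hf, hg, hb i hi24,
      ih y (by omega) (by calc y < 2^i := hyx
        _ ≤ 2^24 := Nat.pow_le_pow_right (by norm_num) (by omega))]

theorem pvStepN_xor' (a b : Nat) : pvStepN (a ^^^ b) = pvStepN a ^^^ pvStepN b := by
  have h : (16777216 : Nat) = 2^24 := by norm_num
  simp only [pvStepN, h, Nat.shiftLeft_xor_distrib, Nat.shiftRight_xor_distrib, Nat.xor_mod_two_pow]
  ac_rfl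

theorem pvBasis_step : ∀ i, i < 24 → pvApply pvStepCols (2^i) = pvStepN (2^i) := by decide

theorem pvApply_stepCols (x : Nat) (hx : x < 2^24) : pvApply pvStepCols x = pvStepN x := by
  exact pvLin_ext (pvApply pvStepCols) pvStepN (pvApply_xor _) pvStepN_xor'
    (by decide) pvBasis_step x hx

theorem pvBasis_id : ∀ i, i < 24 → pvApply ((List.range 24).map (fun i => 1 <<< i)) (2^i) = 2^i := by decide

theorem pvApply_id (x : Nat) (hx : x < 2^24) :
    pvApply ((List.range 24).map (fun i => 1 <<< i)) x = x := by
  exact pvLin_ext _ id (pvApply_xor _) (fun _ _ => rfl) (by decide) pvBasis_id x hx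

theorem pvIter_sq (base : List Nat) (m : Nat) (y : Nat) :
    (pvApply (pvCompose base base))^[m] y = (pvApply base)^[2*m] y := by
  induction m generalizing y with
  | zero => simp
  | succ m ih =>
    rw [Function.iterate_succ_apply, pvApply_compose, ih,
      show 2*(m+1) = (2*m) + 1 + 1 by ring,
      Function.iterate_succ_apply, Function.iterate_succ_apply]

theorem pvPow_apply (n : Nat) (base acc : List Nat) (x : Nat) :
    pvApply (pvPow base acc n) x = (pvApply base)^[n] (pvApply acc x) := by
  induction n using Nat.strong_induction_on generalizing base acc with
  | _ n ih =>
    rw [pvPow]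
    rcases Nat.eq_zero_or_pos n with rfl | hn
    · simp
    rw [if_neg (by omega), ih (n/2) (by omega), pvIter_sq]
    by_cases hpar : n % 2 = 1
    · rw [if_pos hpar, pvApply_compose, ← Function.iterate_succ_apply,
        show (2*(n/2)).succ = n by omega]
    · rw [if_neg hpar, show 2*(n/2) = n by omega]

theorem pvStepN_iter_eq (n x : Nat) (hx : x < 2^24) :
    (pvApply pvStepCols)^[n] x = pvStepN^[n] x := by
  induction n generalizing x with
  | zero => rfl
  | succ n ih =>
    rw [Function.iterate_succ_apply, Function.iterate_succ_apply,
      pvApply_stepCols x hx, ih _ (by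
        have := Nat.mod_lt ((((((pvStepN x)))) : Nat)) (show 0 < 16777216 by norm_num)
        simp only [pvStepN]
        have h : (16777216:Nat) = 2^24 := by norm_num
        rw [← h]
        exact Nat.mod_lt _ (by norm_num))]


theorem pvEmptyRange (n : Int) (h : n ≤ 0) : PySem.List.pyRange 0 n 1 = [] := by
  simp [PySem.List.pyRange]; omega

theorem pvFoldIter (l : List Int) (s : Int) :
    l.foldl (fun s _ => pvRoundA s) s = pvRoundA^[l.length] s := by
  induction l generalizing s with
  | nil => rfl
  | cons c t ih => rw [List.foldl_cons, List.length_cons, ih, Function.iterate_succ_apply]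

theorem pvRoundA_iter (n : Nat) (x : Int) :
    pvRoundA^[n + 1] x = ((pvStepN^[n + 1] ((x % 16777216).toNat) : Nat) : Int) := by
  induction n with
  | zero => simpa using pvRoundA_eq x
  | succ n ih =>
    rw [Function.iterate_succ_apply', ih, pvRoundA_eq]
    have hlt : pvStepN^[n + 1] ((x % 16777216).toNat) < 16777216 := by
      rw [Function.iterate_succ_apply']
      exact Nat.mod_lt _ (by norm_num)
    rw [show ((pvStepN^[n + 1] ((x % 16777216).toNat) : Nat) : Int) % 16777216
        = ((pvStepN^[n + 1] ((x % 16777216).toNat) : Nat) : Int) from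
      Int.emod_eq_of_lt (by positivity) (by exact_mod_cast hlt), Int.toNat_natCast,
      show pvStepN^[n + 1 + 1] ((x % 16777216).toNat)
        = pvStepN (pvStepN^[n + 1] ((x % 16777216).toNat)) from Function.iterate_succ_apply' _ _ _]

-- ===== VERDICT (by name: the statement is the Claim_ definition above) =====
theorem calculate_secret_spec : Claim_equal_calculate_secret := by
  intro secret iterations _
  unfold Spec_calculate_secret calculate_secret calculate_secret_alt
  by_cases h : iterations ≤ 0
  · rw [if_pos h, pvEmptyRange iterations h]
    rfl
  · rw [if_neg h]
    change (PySem.List.pyRange 0 iterations 1).foldl (fun s _ => pvRoundA s) secret = _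
    rw [pvFoldIter]
    rw [show (PySem.List.pyRange 0 iterations 1).length = iterations.toNat by
      rw [show iterations = ((iterations.toNat : Nat) : Int) by omega, PySem.List.pyRange_zero_natCast]
      simp
      omega]
    obtain ⟨m, hm⟩ : ∃ m, iterations.toNat = m + 1 := ⟨iterations.toNat - 1, by omega⟩
    rw [hm, pvRoundA_iter]
    have hrlt : (secret % 16777216).toNat < 2^24 := by
      have := Int.emod_lt_of_pos secret (show (0:Int) < 16777216 by norm_num)
      have := Int.emod_nonneg secret (show (16777216:Int) ≠ 0 by norm_num)
      omega
    rw [pvModM, pvPow_apply, pvApply_id _ hrlt, pvStepN_iter_eq _ _ hrlt, ← hm]
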